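-- pv_equiv track=rewrite | github.com/angie17kim/KMA-BigData-ElecPred-2024 | utils/utils.py | insert_newlines_between_main_sections
-- ===== SOURCE A (Python) =====
-- def insert_newlines_between_main_sections(yaml_str):
--     lines = yaml_str.splitlines()
--     formatted_lines = []
--     for i, line in enumerate(lines):
--         formatted_lines.append(line)
--         # Add a newline before top-level keys
--         if i < len(lines) - 1 and lines[i+1] and not lines[i+1].startswith(' '):
--             formatted_lines.append('')
--     return '\n'.join(formatted_lines)
-- ===== SOURCE B (Python) =====
-- def insert_newlines_between_main_sections(yaml_str):
--     lines = yaml_str.splitlines()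
--     sections = []
--     cur = []
--     for line in lines:
--         if line and not line.startswith(' ') and cur:
--             sections.append(cur)
--             cur = [line]
--         else:
--             cur.append(line)
--     if cur:
--         sections.append(cur)
--     return '\n\n'.join('\n'.join(sec) for sec in sections)
-- ===== Notes on version B (the rewrite author's own statement) =====
-- stated objective: alternative
-- what changed: B materializes explicit sections (starting a new section whenever the current line is a non-empty unindented top-level key) and joins the rendered sections with a blank-line separator, instead of A's indexed loop that looks ahead at the next line and interleaves empty strings before a single newline-join.
import Mathlib
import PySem

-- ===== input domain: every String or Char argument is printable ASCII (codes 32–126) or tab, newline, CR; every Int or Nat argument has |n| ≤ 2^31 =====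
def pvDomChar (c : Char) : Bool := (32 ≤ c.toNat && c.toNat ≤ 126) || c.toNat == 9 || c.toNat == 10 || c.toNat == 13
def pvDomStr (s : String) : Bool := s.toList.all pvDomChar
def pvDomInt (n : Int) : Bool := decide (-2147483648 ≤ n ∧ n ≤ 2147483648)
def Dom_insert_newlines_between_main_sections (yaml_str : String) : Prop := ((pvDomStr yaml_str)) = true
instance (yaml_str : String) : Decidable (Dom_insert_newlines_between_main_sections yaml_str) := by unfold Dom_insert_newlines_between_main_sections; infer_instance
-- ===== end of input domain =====

-- B re-groups the lines into explicit sections split at top-level keys and joins them with blank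
-- separators, instead of A's indexed lookahead loop; an alternative decomposition, same cost.

-- ===== PORT A =====
-- the 'for i, line in enumerate(lines)' loop, building formatted_lines (acc); the whole
-- 'lines' list is carried for the lines[i+1] lookahead, exactly as in the Python.
def pvGoA (lines : List String) : List (Int × String) → List String → List String
  | [], acc => acc
  | (i, line) :: rest, acc =>
    let acc1 := acc ++ [line]
    let acc2 :=
      if decide (i < (lines.length : Int) - 1) &&
         (match PySem.List.pyGet? lines (i + 1) with          -- lines[i+1]; in range under the guard
          | some nxt => !(nxt == "") && !(PySem.Str.startswith nxt " ")
          | none => false) then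
        acc1 ++ [""]
      else acc1
    pvGoA lines rest acc2

def insert_newlines_between_main_sections (yaml_str : String) : String :=
  let lines := PySem.Str.splitlines yaml_str
  PySem.Str.join "\n" (pvGoA lines (PySem.List.enumerate lines 0) [])

-- ===== PORT B =====
-- the 'for line in lines' loop of Source B, carrying (sections, cur)
def pvGoB : List String → List (List String) → List String → List (List String) × List String
  | [], secs, cur => (secs, cur)
  | line :: rest, secs, cur =>
    if (!(line == "") && !(PySem.Str.startswith line " ")) && !cur.isEmpty then
      pvGoB rest (secs ++ [cur]) [line]
    else
      pvGoB rest secs (cur ++ [line])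

def insert_newlines_between_main_sections_alt (yaml_str : String) : String :=
  let lines := PySem.Str.splitlines yaml_str
  let sc := pvGoB lines [] []
  let secs := if sc.2.isEmpty then sc.1 else sc.1 ++ [sc.2]
  PySem.Str.join "\n\n" (secs.map (fun sec => PySem.Str.join "\n" sec))

-- ===== PRECONDITION & SPEC =====
def Spec_insert_newlines_between_main_sections (yaml_str : String) (out : String) : Prop := out = insert_newlines_between_main_sections_alt yaml_str
instance (yaml_str : String) (out : String) : Decidable (Spec_insert_newlines_between_main_sections yaml_str out) := by unfold Spec_insert_newlines_between_main_sections; infer_instance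

-- ===== CLAIM (what is proved, stated in full; the proofs are below) =====
def Claim_equal_insert_newlines_between_main_sections : Prop := ∀ (yaml_str : String), Dom_insert_newlines_between_main_sections yaml_str → Spec_insert_newlines_between_main_sections yaml_str (insert_newlines_between_main_sections yaml_str)

-- ===== LEMMAS AND PROOFS =====

-- "top-level key" test: the line is truthy and does not start with a space
def pvTop (s : String) : Bool := !(s == "") && !(PySem.Str.startswith s " ")

-- canonical rendering of the tail: each line preceded by "\n\n" (top-level) or "\n"
def pvT : List String → String
  | [] => ""
  | l :: rest => (if pvTop l then "\n\n" else "\n") ++ l ++ pvT rest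

-- the list A's loop builds, characterised structurally
def pvF : List String → List String
  | [] => []
  | l :: rest =>
      l :: ((match rest with
             | [] => []
             | r :: _ => if pvTop r then [""] else []) ++ pvF rest)

theorem sjoin_nil (sep : String) : PySem.Str.join sep [] = "" := by
  simp [PySem.Str.join, PySem.Chars.join, List.intercalate]

theorem sjoin_singleton (sep x : String) : PySem.Str.join sep [x] = x := by
  simp [PySem.Str.join, PySem.Chars.join_singleton]

theorem sjoin_cons_cons (sep x y : String) (ys : List String) :
    PySem.Str.join sep (x :: y :: ys) = x ++ sep ++ PySem.Str.join sep (y :: ys) := by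
  rw [← String.toList_inj]
  simp [PySem.Str.join, PySem.Chars.join_cons_cons]

theorem sjoin_cons_ne (sep x : String) (L : List String) (h : L ≠ []) :
    PySem.Str.join sep (x :: L) = x ++ sep ++ PySem.Str.join sep L := by
  cases L with
  | nil => exact absurd rfl h
  | cons y ys => exact sjoin_cons_cons sep x y ys

theorem sjoin_append_singleton (sep b : String) (xs : List String) (h : xs ≠ []) :
    PySem.Str.join sep (xs ++ [b]) = PySem.Str.join sep xs ++ sep ++ b := by
  induction xs with
  | nil => exact absurd rfl h
  | cons x xs ih =>
    cases xs with
    | nil => simp [sjoin_cons_cons, sjoin_singleton]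
    | cons y ys =>
      rw [List.cons_append, sjoin_cons_ne sep x ((y :: ys) ++ [b]) (by simp),
          ih (by simp), sjoin_cons_ne sep x (y :: ys) (by simp)]
      rw [← String.toList_inj]; simp

theorem sjoin_merge (sep a b : String) (xs : List String) (ys : List String) :
    PySem.Str.join sep (xs ++ a :: b :: ys) = PySem.Str.join sep (xs ++ (a ++ sep ++ b) :: ys) := by
  induction xs with
  | nil =>
    cases ys with
    | nil => simp [sjoin_cons_cons, sjoin_singleton]
    | cons y ys' =>
      simp only [List.nil_append, sjoin_cons_cons]
      rw [← String.toList_inj]; simp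
  | cons x xs ih =>
    rw [List.cons_append, List.cons_append,
        sjoin_cons_ne sep x (xs ++ a :: b :: ys) (by simp),
        sjoin_cons_ne sep x (xs ++ (a ++ sep ++ b) :: ys) (by simp), ih]

theorem pvGoA_eq (suf : List String) : ∀ (lines : List String) (k : Nat) (acc : List String),
    lines.drop k = suf →
    pvGoA lines (PySem.List.enumerate suf (k : Int)) acc = acc ++ pvF suf := by
  induction suf with
  | nil => intro lines k acc _; simp [PySem.List.enumerate, pvGoA, pvF]
  | cons l rest ih =>
    intro lines k acc hdrop
    have hk : k < lines.length := by
      by_contra h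
      rw [List.drop_eq_nil_of_le (by omega)] at hdrop
      exact List.cons_ne_nil l rest hdrop.symm
    have hlen : lines.length = k + 1 + rest.length := by
      have := congrArg List.length hdrop
      simp [List.length_drop] at this
      omega
    have hdrop' : lines.drop (k + 1) = rest := by
      have : lines.drop (k + 1) = (lines.drop k).drop 1 := by
        rw [List.drop_drop]
      rw [this, hdrop]; rfl
    rw [PySem.List.enumerate_cons]
    show pvGoA lines ((↑k, l) :: PySem.List.enumerate rest (↑k + 1)) acc = acc ++ pvF (l :: rest)
    rw [pvGoA]
    have hget : PySem.List.pyGet? lines ((k : Int) + 1) = rest[0]? := by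
      have : ((k : Int) + 1) = ((k + 1 : Nat) : Int) := by push_cast; ring
      rw [this, PySem.List.pyGet?_natCast, ← List.getElem?_drop, hdrop]
      simp
    have hcast : ((k : Int) + 1) = (((k + 1 : Nat)) : Int) := by push_cast; ring
    cases rest with
    | nil =>
      have hlen' : lines.length = k + 1 := by simpa using hlen
      have hc1 : ¬ ((k : Int) < (lines.length : Int) - 1) := by
        rw [hlen']; push_cast; omega
      simp only [hget, List.getElem?_nil]
      rw [if_neg (by simp [hc1])]
      rw [hcast, ih lines (k + 1) (acc ++ [l]) hdrop']
      simp [pvF]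
    | cons r rs =>
      have hlen' : lines.length = k + 2 + rs.length := by simp at hlen; omega
      have hc1 : (k : Int) < (lines.length : Int) - 1 := by
        rw [hlen']; push_cast; omega
      simp only [hget, List.getElem?_cons_zero]
      by_cases htop : pvTop r = true
      · have ht' : (!(r == "") && !(PySem.Str.startswith r " ")) = true := htop
        rw [if_pos (by rw [ht']; simp [hc1])]
        rw [hcast, ih lines (k + 1) (acc ++ [l] ++ [""]) hdrop']
        simp [pvF, htop]
      · have ht' : (!(r == "") && !(PySem.Str.startswith r " ")) = false := by
          simpa [pvTop] using htop
        rw [if_neg (by rw [ht']; simp)]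
        rw [hcast, ih lines (k + 1) (acc ++ [l]) hdrop']
        simp [pvF, Bool.eq_false_iff.mpr htop]

theorem sjoin_pvF (rest : List String) : ∀ (l : String),
    PySem.Str.join "\n" (pvF (l :: rest)) = l ++ pvT rest := by
  induction rest with
  | nil => intro l; simp [pvF, pvT, sjoin_singleton]
  | cons r rs ih =>
    intro l
    have hne : pvF (r :: rs) ≠ [] := by simp [pvF]
    by_cases htop : pvTop r = true
    · have h1 : pvF (l :: r :: rs) = l :: "" :: pvF (r :: rs) := by
        conv_lhs => rw [pvF]
        simp [htop]
      rw [h1, sjoin_cons_ne "\n" l ("" :: pvF (r :: rs)) (by simp),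
          sjoin_cons_ne "\n" "" (pvF (r :: rs)) hne, ih r]
      have h2 : pvT (r :: rs) = "\n\n" ++ r ++ pvT rs := by
        rw [pvT, htop]; simp
      rw [h2, ← String.toList_inj]; simp
    · have h1 : pvF (l :: r :: rs) = l :: pvF (r :: rs) := by
        conv_lhs => rw [pvF]
        simp [htop]
      rw [h1, sjoin_cons_ne "\n" l (pvF (r :: rs)) hne, ih r]
      have h2 : pvT (r :: rs) = "\n" ++ r ++ pvT rs := by
        rw [pvT, Bool.eq_false_iff.mpr htop]; simp
      rw [h2, ← String.toList_inj]; simp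

-- the finalisation of port B, as a function of the loop's final state
def pvFinB (sc : List (List String) × List String) : String :=
  PySem.Str.join "\n\n" ((if sc.2.isEmpty then sc.1 else sc.1 ++ [sc.2]).map
    (fun sec => PySem.Str.join "\n" sec))

theorem pvGoB_eq (rest : List String) : ∀ (secs : List (List String)) (cur : List String),
    cur ≠ [] →
    pvFinB (pvGoB rest secs cur) =
      PySem.Str.join "\n\n"
        (secs.map (fun sec => PySem.Str.join "\n" sec) ++ [PySem.Str.join "\n" cur ++ pvT rest]) := by
  induction rest with
  | nil =>
    intro secs cur hcur
    simp only [pvGoB, pvFinB, List.isEmpty_eq_false_iff.mpr hcur]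
    simp [pvT]
  | cons line rest ih =>
    intro secs cur hcur
    rw [pvGoB]
    by_cases htop : pvTop line = true
    · have hc : ((!(line == "") && !(PySem.Str.startswith line " ")) && !cur.isEmpty) = true := by
        rw [show (!(line == "") && !(PySem.Str.startswith line " ")) = true from htop]
        simp [List.isEmpty_eq_false_iff.mpr hcur]
      rw [hc, if_pos rfl]
      rw [ih (secs ++ [cur]) [line] (by simp)]
      rw [sjoin_singleton, List.map_append, List.map_singleton, List.append_assoc,
          List.singleton_append, sjoin_merge]
      rw [show pvT (line :: rest) = "\n\n" ++ line ++ pvT rest by rw [pvT, htop]; simp]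
      rw [← String.toList_inj]
      simp [PySem.Str.join]
    · have hc : ((!(line == "") && !(PySem.Str.startswith line " ")) && !cur.isEmpty) = false := by
        have h0 : (!(line == "") && !(PySem.Str.startswith line " ")) = false := by
          simpa [pvTop] using htop
        rw [h0]; simp
      rw [hc, if_neg (by simp)]
      rw [ih secs (cur ++ [line]) (by simp)]
      rw [sjoin_append_singleton "\n" line cur hcur]
      rw [show pvT (line :: rest) = "\n" ++ line ++ pvT rest by
            rw [pvT, Bool.eq_false_iff.mpr htop]; simp]
      rw [← String.toList_inj]
      simp [PySem.Str.join]

-- ===== VERDICT (by name: the statement is the Claim_ definition above) =====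
theorem insert_newlines_between_main_sections_spec : Claim_equal_insert_newlines_between_main_sections := by
  intro yaml_str _
  show insert_newlines_between_main_sections yaml_str = insert_newlines_between_main_sections_alt yaml_str
  unfold insert_newlines_between_main_sections insert_newlines_between_main_sections_alt
  cases hl : PySem.Str.splitlines yaml_str with
  | nil => simp [pvGoA, pvGoB, PySem.List.enumerate, sjoin_nil]
  | cons l rest =>
    have hA : pvGoA (l :: rest) (PySem.List.enumerate (l :: rest) 0) [] = pvF (l :: rest) := by
      have := pvGoA_eq (l :: rest) (l :: rest) 0 [] (by simp)
      simpa using this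
    have hB0 : pvGoB (l :: rest) [] [] = pvGoB rest [] [l] := by
      rw [pvGoB]; simp
    show PySem.Str.join "\n" (pvGoA (l :: rest) (PySem.List.enumerate (l :: rest) 0) []) =
      pvFinB (pvGoB (l :: rest) [] [])
    rw [hA, sjoin_pvF, hB0, pvGoB_eq rest [] [l] (by simp), sjoin_singleton]
    simp [sjoin_singleton]
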